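-- pv_equiv track=rewrite | github.com/Renatkg20/stepik_5 | main.py | even
-- ===== SOURCE A (Python) =====
-- def even(w):
--     n = []
--     r = w
--     for i in range(len(r)):
--         if i % 2 == 0:
--             w[i]
--             n.insert(i+1, w[i])
--         else:
--             n.insert(i-1, w[i])
--     return " ".join(n)
-- ===== SOURCE B (Python) =====
-- def even(w):
--     # Simpler: walk the list two elements at a time, emitting each adjacent pair swapped.
--     out = []
--     i = 0
--     while i + 1 < len(w):
--         out.append(w[i + 1])
--         out.append(w[i])
--         i += 2
--     if i < len(w):
--         out.append(w[i])
--     return " ".join(out)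
-- ===== Notes on version B (the rewrite author's own statement) =====
-- stated objective: simpler
-- what changed: B walks the list two elements at a time and emits each adjacent pair swapped (leftover element appended as is), instead of A's per-element index loop that branches on parity and computes an insert position into a growing list for every element.
import Mathlib
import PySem

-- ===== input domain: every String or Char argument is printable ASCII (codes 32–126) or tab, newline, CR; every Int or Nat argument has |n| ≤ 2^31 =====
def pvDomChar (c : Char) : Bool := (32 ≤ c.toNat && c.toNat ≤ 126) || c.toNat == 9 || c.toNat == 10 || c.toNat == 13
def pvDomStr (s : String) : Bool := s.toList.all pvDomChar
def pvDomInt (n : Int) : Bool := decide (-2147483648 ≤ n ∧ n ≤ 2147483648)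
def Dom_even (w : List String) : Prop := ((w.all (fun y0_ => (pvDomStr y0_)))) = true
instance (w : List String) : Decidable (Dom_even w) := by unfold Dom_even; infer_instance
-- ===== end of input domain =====

-- B joins the list with each adjacent pair swapped, by structural recursion on pairs;
-- objective: simpler than A's per-element parity branch with positional inserts.

-- ===== PORT A =====
-- 'w[i]' in A is a bare index expression inside range(len(w)), so it never raises and has
-- no effect; pyGetD with default "" is exact here since i is always in range.
def even (w : List String) : String :=
  let r := w
  let n := (PySem.List.pyRange 0 (PySem.List.len r) 1).foldl
    (fun n i =>
      if PySem.Int.mod i 2 == 0 then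
        PySem.List.insert n (i + 1) (PySem.List.pyGetD w i "")
      else
        PySem.List.insert n (i - 1) (PySem.List.pyGetD w i "")) []
  PySem.Str.join " " n

-- ===== PORT B =====
def swapPairs : List String → List String
  | a :: b :: t => b :: a :: swapPairs t
  | xs => xs

def even_alt (w : List String) : String := PySem.Str.join " " (swapPairs w)

-- ===== PRECONDITION & SPEC =====
def Spec_even (w : List String) (out : String) : Prop := out = even_alt w
instance (w : List String) (out : String) : Decidable (Spec_even w out) := by unfold Spec_even; infer_instance

-- ===== CLAIM (what is proved, stated in full; the proofs are below) =====
def Claim_equal_even : Prop := ∀ (w : List String), Dom_even w → Spec_even w (even w)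

-- ===== LEMMAS AND PROOFS =====

-- Python list.insert clamps: a position at or beyond the length appends.
theorem insert_of_len_le {α : Type} (xs : List α) (i : Int) (v : α)
    (h : (xs.length : Int) ≤ i) : PySem.List.insert xs i v = xs ++ [v] := by
  have h0 : ¬ i < 0 := by omega
  have hm : min i (xs.length : Int) = (xs.length : Int) := by omega
  simp [PySem.List.insert, PySem.List.sliceIndices, h0, hm]

theorem even_loop (w : List String) : ∀ (t pre acc : List String),
    w = pre ++ t → acc.length = pre.length → pre.length % 2 = 0 →
    (PySem.List.pyRange (pre.length : Int) (w.length : Int) 1).foldl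
      (fun n i =>
        if PySem.Int.mod i 2 == 0 then
          PySem.List.insert n (i + 1) (PySem.List.pyGetD w i "")
        else
          PySem.List.insert n (i - 1) (PySem.List.pyGetD w i "")) acc
      = acc ++ swapPairs t := by
  intro t
  induction t using swapPairs.induct with
  | case1 a b t ih =>
    intro pre acc hw hlen hpar
    have hwl : w.length = pre.length + (t.length + 2) := by
      subst hw; simp only [List.length_append, List.length_cons]
    have h1 : (pre.length : Int) < (w.length : Int) := by omega
    have h2 : (pre.length : Int) + 1 < (w.length : Int) := by omega
    rw [PySem.List.pyRange_one_cons h1, PySem.List.pyRange_one_cons h2]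
    simp only [List.foldl_cons]
    have hmod0 : (PySem.Int.mod (pre.length : Int) 2 == 0) = true := by
      have : PySem.Int.mod (pre.length : Int) 2 = ((pre.length % 2 : Nat) : Int) := by
        exact_mod_cast PySem.Int.mod_natCast pre.length 2
      rw [this, hpar]; simp
    have hmod1 : (PySem.Int.mod ((pre.length : Int) + 1) 2 == 0) = false := by
      have hc : ((pre.length : Int) + 1) = ((pre.length + 1 : Nat) : Int) := by push_cast; ring
      have h1' : PySem.Int.mod ((pre.length : Int) + 1) 2 = (((pre.length + 1) % 2 : Nat) : Int) := by
        rw [hc]; exact_mod_cast PySem.Int.mod_natCast (pre.length + 1) 2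
      have h2' : (pre.length + 1) % 2 = 1 := by omega
      rw [h1', h2']; simp
    have hga : PySem.List.pyGetD w (pre.length : Int) "" = a := by
      rw [PySem.List.pyGetD_natCast]
      subst hw; simp
    have hgb : PySem.List.pyGetD w ((pre.length : Int) + 1) "" = b := by
      have hc : ((pre.length : Int) + 1) = ((pre.length + 1 : Nat) : Int) := by push_cast; ring
      rw [hc, PySem.List.pyGetD_natCast]
      subst hw
      rw [List.getD_eq_getElem?_getD]
      rw [List.getElem?_append_right (by omega)]
      simp
    simp only [hmod0, hmod1, Bool.false_eq_true, if_true, if_false]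
    have hins1 : PySem.List.insert acc ((pre.length : Int) + 1) (PySem.List.pyGetD w (pre.length : Int) "")
        = acc ++ [a] := by
      rw [hga]; exact insert_of_len_le acc _ a (by omega)
    have hins2 : PySem.List.insert (acc ++ [a]) ((pre.length : Int) + 1 - 1) (PySem.List.pyGetD w ((pre.length : Int) + 1) "")
        = acc ++ [b, a] := by
      rw [hgb]
      have : (pre.length : Int) + 1 - 1 = ((pre.length : Nat) : Int) := by ring
      rw [this, PySem.List.insert_natCast (acc ++ [a]) pre.length b (by simp; omega)]
      rw [← hlen]
      simp
    rw [hins1, hins2]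
    have hrec := ih (pre ++ [a, b]) (acc ++ [b, a])
      (by rw [hw]; simp) (by simp [hlen]) (by simp; omega)
    have hcast : (pre.length : Int) + 1 + 1 = ((pre ++ [a, b]).length : Int) := by
      simp only [List.length_append, List.length_cons, List.length_nil]
      push_cast
      ring
    rw [hcast, hrec]
    simp [swapPairs]
  | case2 xs hnot =>
    -- xs has fewer than two elements
    intro pre acc hw hlen hpar
    rcases xs with _ | ⟨a, _ | ⟨b, t⟩⟩
    case cons.cons => exact (hnot a b t rfl).elim
    case nil =>
      have : (w.length : Int) ≤ (pre.length : Int) := by subst hw; simp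
      rw [PySem.List.pyRange_one_eq_nil this]
      simp [swapPairs]
    case cons.nil =>
      have hwl : w.length = pre.length + 1 := by subst hw; simp
      have h1 : (pre.length : Int) < (w.length : Int) := by omega
      rw [PySem.List.pyRange_one_cons h1]
      simp only [List.foldl_cons]
      have hmod0 : (PySem.Int.mod (pre.length : Int) 2 == 0) = true := by
        have : PySem.Int.mod (pre.length : Int) 2 = ((pre.length % 2 : Nat) : Int) := by
          exact_mod_cast PySem.Int.mod_natCast pre.length 2
        rw [this, hpar]; simp
      have hga : PySem.List.pyGetD w (pre.length : Int) "" = a := by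
        rw [PySem.List.pyGetD_natCast]
        subst hw; simp
      simp only [hmod0, if_true]
      rw [hga, insert_of_len_le acc _ a (by omega)]
      have : (w.length : Int) ≤ (pre.length : Int) + 1 := by omega
      rw [PySem.List.pyRange_one_eq_nil this]
      simp [swapPairs]

-- ===== VERDICT (by name: the statement is the Claim_ definition above) =====
theorem even_spec : Claim_equal_even := by
  intro w _
  unfold Spec_even even even_alt
  have h := even_loop w w [] [] (by simp) rfl (by simp)
  simp only [List.length_nil, Nat.cast_zero] at h
  simp only [PySem.List.len_eq]
  rw [h]
  simp
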